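-- pv_equiv track=rewrite | github.com/pypi-data/pypi-mirror-98 | packages/LupSeat/LupSeat-1.3.0-py3-none-any.whl/models/assign.py | get_subchunk_empty
-- ===== SOURCE A (Python) =====
-- def get_subchunk_empty(new_subchunks, subchunk_size, remainder, offset):
--     '''Gets empty seat indiices based on params.
--     Args:
--         new_subchunks (int): Number of subchunks to split seats into.
--         subchunk_size (int): Number of seats per subchunk.
--         remainder (int): Left over seats to be distributed into subchunks.
--         offset (int): Number of col offset where the seat begins.
--
--     Returns:
--         (List[int]): List of empty seat indices by column.
--     '''
--     counter = 0
--     empty_list = []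
--     for subchunk in range(new_subchunks):
--         # Compute size of current chunk
--         cur_subchunk_size = subchunk_size
--         if remainder > 0:
--             cur_subchunk_size += 1
--             remainder -= 1
--
--         empty_list.append(cur_subchunk_size + counter + offset)
--         counter += cur_subchunk_size + 1
--
--     # Remove last element
--     return empty_list[:-1]
-- ===== SOURCE B (Python) =====
-- def get_subchunk_empty(new_subchunks, subchunk_size, remainder, offset):
--     '''Closed-form re-implementation: each cumulative empty-seat index is
--     computed directly from its position instead of threading a running
--     counter and mutating remainder.'''
--     return [(i + 1) * subchunk_size + min(i + 1, max(remainder, 0)) + i + offset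
--             for i in range(new_subchunks - 1)]
-- ===== Notes on version B (the rewrite author's own statement) =====
-- stated objective: simpler
-- what changed: Replaces the counter/remainder-mutating loop plus trailing [:-1] slice with a single closed-form list comprehension that computes each index directly from its position.
import Mathlib
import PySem

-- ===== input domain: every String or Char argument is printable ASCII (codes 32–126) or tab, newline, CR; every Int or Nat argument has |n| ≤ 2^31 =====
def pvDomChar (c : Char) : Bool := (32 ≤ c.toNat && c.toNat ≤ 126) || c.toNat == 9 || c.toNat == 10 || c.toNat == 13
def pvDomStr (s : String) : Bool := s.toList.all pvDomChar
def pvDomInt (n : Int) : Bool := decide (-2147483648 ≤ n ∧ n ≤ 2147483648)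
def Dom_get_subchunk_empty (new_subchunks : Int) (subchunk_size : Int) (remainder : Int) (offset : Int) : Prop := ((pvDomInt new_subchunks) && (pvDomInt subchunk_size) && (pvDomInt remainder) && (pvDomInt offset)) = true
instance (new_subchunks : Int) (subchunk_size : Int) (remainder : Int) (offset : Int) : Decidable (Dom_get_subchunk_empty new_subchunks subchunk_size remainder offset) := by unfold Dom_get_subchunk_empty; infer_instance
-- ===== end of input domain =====

-- B replaces A's counter/remainder-mutating loop + [:-1] slice with a closed-form
-- list comprehension (objective: simpler); both are O(n).

-- ===== PORT A =====
-- loop body of A; state = (counter, remainder, empty_list); the loop variable is unused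
def pvStepA (subchunk_size : Int) (offset : Int)
    (st : Int × Int × List Int) : Int × Int × List Int :=
  let counter := st.1
  let remainder := st.2.1
  let empty_list := st.2.2
  let cur_subchunk_size := subchunk_size
  let cur_subchunk_size := if remainder > 0 then cur_subchunk_size + 1 else cur_subchunk_size
  let remainder := if remainder > 0 then remainder - 1 else remainder
  let empty_list := empty_list ++ [cur_subchunk_size + counter + offset]
  let counter := counter + cur_subchunk_size + 1
  (counter, remainder, empty_list)

def get_subchunk_empty (new_subchunks : Int) (subchunk_size : Int) (remainder : Int) (offset : Int) : List Int :=
  let st := (PySem.List.pyRange 0 new_subchunks 1).foldl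
    (fun st _subchunk => pvStepA subchunk_size offset st) (0, remainder, [])
  PySem.List.slice st.2.2 none (some (-1))

-- ===== PORT B =====
def get_subchunk_empty_alt (new_subchunks : Int) (subchunk_size : Int) (remainder : Int) (offset : Int) : List Int :=
  (PySem.List.pyRange 0 (new_subchunks - 1) 1).map
    (fun i => (i + 1) * subchunk_size + min (i + 1) (max remainder 0) + i + offset)

-- ===== PRECONDITION & SPEC =====
def Spec_get_subchunk_empty (new_subchunks : Int) (subchunk_size : Int) (remainder : Int) (offset : Int) (out : List Int) : Prop := out = get_subchunk_empty_alt new_subchunks subchunk_size remainder offset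
instance (new_subchunks : Int) (subchunk_size : Int) (remainder : Int) (offset : Int) (out : List Int) : Decidable (Spec_get_subchunk_empty new_subchunks subchunk_size remainder offset out) := by unfold Spec_get_subchunk_empty; infer_instance

-- ===== CLAIM (what is proved, stated in full; the proofs are below) =====
def Claim_equal_get_subchunk_empty : Prop := ∀ (new_subchunks : Int) (subchunk_size : Int) (remainder : Int) (offset : Int), Dom_get_subchunk_empty new_subchunks subchunk_size remainder offset → Spec_get_subchunk_empty new_subchunks subchunk_size remainder offset (get_subchunk_empty new_subchunks subchunk_size remainder offset)

-- ===== LEMMAS AND PROOFS =====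

-- a fold whose body ignores the list element is an iterate of the body
theorem pv_foldl_const {α σ : Type} (g : σ → σ) (L : List α) (s : σ) :
    L.foldl (fun s _ => g s) s = g^[L.length] s := by
  induction L generalizing s with
  | nil => rfl
  | cons x xs ih => simp [List.foldl, ih, Function.iterate_succ_apply]

-- invariant of A's loop after n iterations
theorem pvStepA_iterate (ss r off : Int) (n : Nat) :
    (pvStepA ss off)^[n] (0, r, []) =
      ((n : Int) * ss + min (n : Int) (max r 0) + n,
       r - min (n : Int) (max r 0),
       (List.range n).map (fun (k : Nat) =>
         ((k : Int) + 1) * ss + min ((k : Int) + 1) (max r 0) + (k : Int) + off)) := by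
  induction n with
  | zero =>
    simp only [Function.iterate_zero, id_eq, List.range_zero, List.map_nil, Nat.cast_zero,
      Prod.mk.injEq, and_true]
    omega
  | succ m ih =>
    rw [Function.iterate_succ_apply', ih]
    simp only [pvStepA, List.range_succ, List.map_append, List.map_cons, List.map_nil,
      Prod.mk.injEq, Nat.cast_succ, List.append_cancel_left_eq, List.cons.injEq, and_true]
    have hmul : ((m : Int) + 1) * ss = (m : Int) * ss + ss := by ring
    refine ⟨?_, ?_, ?_⟩
    · rw [hmul]; split_ifs with h <;> omega
    · split_ifs with h <;> omega
    · rw [hmul]; split_ifs with h <;> omega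

theorem pv_result (ns ss r off : Int) :
    get_subchunk_empty ns ss r off = get_subchunk_empty_alt ns ss r off := by
  unfold get_subchunk_empty get_subchunk_empty_alt
  rw [pv_foldl_const (pvStepA ss off), PySem.List.length_pyRange_one, pvStepA_iterate,
    PySem.List.slice_to_neg_one]
  rw [PySem.List.pyRange_one]
  have hlen : ((ns - 1) - 0).toNat = (ns - 0).toNat - 1 := by omega
  rw [hlen]
  simp only [Int.sub_zero]
  rcases Nat.eq_zero_or_pos ns.toNat with h | h
  · simp [h]
  · obtain ⟨m, hm⟩ : ∃ m, ns.toNat = m + 1 := ⟨ns.toNat - 1, by omega⟩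
    rw [hm]
    simp only [List.range_succ, List.map_append, List.map_cons, List.map_nil,
      Nat.add_sub_cancel]
    rw [List.dropLast_concat, List.map_map]
    apply List.map_congr_left
    intro k _
    simp only [Function.comp_apply, zero_add]

-- ===== VERDICT (by name: the statement is the Claim_ definition above) =====
theorem get_subchunk_empty_spec : Claim_equal_get_subchunk_empty := by
  intro ns ss r off _
  exact pv_result ns ss r off
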